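-- pv_equiv track=rewrite | github.com/yurnam/honeypot | SNMP_Honeypot.py | parse_oid
-- ===== SOURCE A (Python) =====
-- def parse_oid(oid_data):
--     if len(oid_data) < 4:
--         return "<invalid OID>"
--     if oid_data[0] != 0x30:
--         return "<not a sequence>"
--     oid_start = 4
--     if oid_data[oid_start-2] != 0x06:
--         return "<not an OID>"
--     oid_len = oid_data[oid_start-1]
--     oid_bytes = oid_data[oid_start:oid_start+oid_len]
--     oid_numbers = []
--     if len(oid_bytes) < 1:
--         return "<empty OID>"
--     first_byte = oid_bytes[0]
--     oid_numbers.append(first_byte // 40)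
--     oid_numbers.append(first_byte % 40)
--     val = 0
--     for b in oid_bytes[1:]:
--         if b & 0x80:
--             val = (val << 7) | (b & 0x7F)
--         else:
--             val = (val << 7) | b
--             oid_numbers.append(val)
--             val = 0
--     return '.'.join(map(str, oid_numbers))
-- ===== SOURCE B (Python) =====
-- def parse_oid(oid_data):
--     if len(oid_data) < 4:
--         return "<invalid OID>"
--     if oid_data[0] != 0x30:
--         return "<not a sequence>"
--     if oid_data[2] != 0x06:
--         return "<not an OID>"
--     oid_bytes = oid_data[4:4 + oid_data[3]]
--     if not oid_bytes:
--         return "<empty OID>"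
--     # first pass: split the continuation stream into complete groups
--     # (continuation-byte prefix, terminator byte); a trailing group with no
--     # terminator is never appended and thus dropped.
--     groups = []
--     cur = []
--     for b in oid_bytes[1:]:
--         if b & 0x80:
--             cur.append(b)
--         else:
--             groups.append((cur, b))
--             cur = []
--     # second pass: decode each complete group
--     nums = [oid_bytes[0] // 40, oid_bytes[0] % 40]
--     for pre, last in groups:
--         n = 0
--         for c in pre:
--             n = (n << 7) | (c & 0x7F)
--         nums.append((n << 7) | last)
--     return '.'.join(str(n) for n in nums)
-- ===== Notes on version B (the rewrite author's own statement) =====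
-- stated objective: alternative
-- what changed: Replaces A's single loop carrying a running value across iterations by a two-pass decomposition: first partition the continuation bytes into complete (prefix, terminator) groups, discarding an unfinished trailing group, then decode each group with an independent shift-or fold.
import Mathlib
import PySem

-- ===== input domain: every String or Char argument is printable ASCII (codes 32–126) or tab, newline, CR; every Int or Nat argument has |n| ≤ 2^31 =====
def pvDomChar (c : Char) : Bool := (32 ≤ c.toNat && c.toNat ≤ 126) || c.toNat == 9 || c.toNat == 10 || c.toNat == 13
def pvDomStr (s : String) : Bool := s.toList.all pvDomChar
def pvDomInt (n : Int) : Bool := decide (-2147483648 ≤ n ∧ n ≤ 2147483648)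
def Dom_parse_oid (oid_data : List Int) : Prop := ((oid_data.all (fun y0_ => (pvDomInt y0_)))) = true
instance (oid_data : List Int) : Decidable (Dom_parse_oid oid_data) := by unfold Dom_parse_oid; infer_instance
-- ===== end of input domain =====

-- B replaces A's single loop (running value carried across iterations) by a two-pass
-- decomposition: partition into complete (prefix, terminator) groups, then decode each
-- group with an independent fold; same O(n) cost (objective: alternative).


-- ===== PORT A =====
-- A's single loop over oid_bytes[1:], carrying (val, oid_numbers).
def parseOidLoopA : List Int → Int × List Int → Int × List Int
  | [], s => s
  | b :: t, (val, nums) =>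
    if PySem.Int.band b 128 ≠ 0 then
      parseOidLoopA t (PySem.Int.bor (val <<< 7) (PySem.Int.band b 127), nums)
    else
      parseOidLoopA t (0, nums ++ [PySem.Int.bor (val <<< 7) b])

def parse_oid (oid_data : List Int) : String :=
  if oid_data.length < 4 then "<invalid OID>"
  else if PySem.List.pyGetD oid_data 0 0 ≠ 48 then "<not a sequence>"  -- index guarded by length ≥ 4, so pyGetD is exact
  else if PySem.List.pyGetD oid_data 2 0 ≠ 6 then "<not an OID>"
  else
    let oid_len := PySem.List.pyGetD oid_data 3 0
    let oid_bytes := PySem.List.slice oid_data (some 4) (some (4 + oid_len))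
    if oid_bytes.length < 1 then "<empty OID>"
    else
      let first_byte := PySem.List.pyGetD oid_bytes 0 0
      let r := parseOidLoopA (PySem.List.slice oid_bytes (some 1) none)
                 (0, [PySem.Int.floordiv first_byte 40, PySem.Int.mod first_byte 40])
      PySem.Str.join "." (r.2.map PySem.Int.toStr)

-- ===== PORT B =====
-- first pass: fold accumulating (complete groups, current continuation prefix)
def pvStepB (s : List (List Int × Int) × List Int) (b : Int) : List (List Int × Int) × List Int :=
  if PySem.Int.band b 128 ≠ 0 then (s.1, s.2 ++ [b]) else (s.1 ++ [(s.2, b)], [])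

-- second pass: decode one complete group
def pvDecodeB (g : List Int × Int) : Int :=
  PySem.Int.bor ((g.1.foldl (fun n c => PySem.Int.bor (n <<< 7) (PySem.Int.band c 127)) 0) <<< 7) g.2

def parse_oid_alt (oid_data : List Int) : String :=
  if oid_data.length < 4 then "<invalid OID>"
  else if PySem.List.pyGetD oid_data 0 0 ≠ 48 then "<not a sequence>"  -- index guarded by length ≥ 4, so pyGetD is exact
  else if PySem.List.pyGetD oid_data 2 0 ≠ 6 then "<not an OID>"
  else
    let oid_bytes := PySem.List.slice oid_data (some 4) (some (4 + PySem.List.pyGetD oid_data 3 0))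
    if oid_bytes.length < 1 then "<empty OID>"
    else
      let groups := ((PySem.List.slice oid_bytes (some 1) none).foldl pvStepB ([], [])).1
      let fb := PySem.List.pyGetD oid_bytes 0 0
      let nums := [PySem.Int.floordiv fb 40, PySem.Int.mod fb 40] ++ groups.map pvDecodeB
      PySem.Str.join "." (nums.map PySem.Int.toStr)

-- ===== PRECONDITION & SPEC =====
def Spec_parse_oid (oid_data : List Int) (out : String) : Prop := out = parse_oid_alt oid_data
instance (oid_data : List Int) (out : String) : Decidable (Spec_parse_oid oid_data out) := by unfold Spec_parse_oid; infer_instance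

-- ===== CLAIM (what is proved, stated in full; the proofs are below) =====
def Claim_equal_parse_oid : Prop := ∀ (oid_data : List Int), Dom_parse_oid oid_data → Spec_parse_oid oid_data (parse_oid oid_data)

-- ===== LEMMAS AND PROOFS =====

-- reference splitter: the group list B's first pass produces
def pvSplitG : List Int → List Int → List (List Int × Int)
  | [], _ => []
  | b :: t, cur =>
    if PySem.Int.band b 128 ≠ 0 then pvSplitG t (cur ++ [b])
    else (cur, b) :: pvSplitG t []

theorem pvFoldB_split (t : List Int) :
    ∀ (groups : List (List Int × Int)) (cur : List Int),
      (t.foldl pvStepB (groups, cur)).1 = groups ++ pvSplitG t cur := by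
  induction t with
  | nil => intro groups cur; simp [pvSplitG]
  | cons b t ih =>
    intro groups cur
    by_cases h : PySem.Int.band b 128 ≠ 0
    · simp [List.foldl_cons, pvStepB, pvSplitG, h, ih]
    · simp [List.foldl_cons, pvStepB, pvSplitG, h, ih]

theorem pvLoopA_split (t : List Int) :
    ∀ (cur : List Int) (nums : List Int),
      (parseOidLoopA t
          (cur.foldl (fun n c => PySem.Int.bor (n <<< 7) (PySem.Int.band c 127)) 0, nums)).2
        = nums ++ (pvSplitG t cur).map pvDecodeB := by
  induction t with
  | nil => intro cur nums; simp [parseOidLoopA, pvSplitG]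
  | cons b t ih =>
    intro cur nums
    by_cases h : PySem.Int.band b 128 ≠ 0
    · simp only [parseOidLoopA]
      rw [if_pos h]
      have hstep :
          PySem.Int.bor
              ((cur.foldl (fun n c => PySem.Int.bor (n <<< 7) (PySem.Int.band c 127)) 0) <<< 7)
              (PySem.Int.band b 127)
            = (cur ++ [b]).foldl (fun n c => PySem.Int.bor (n <<< 7) (PySem.Int.band c 127)) 0 := by
        simp
      rw [hstep, ih]
      simp [pvSplitG, h]
    · simp only [parseOidLoopA]
      rw [if_neg h]
      have h0 : (0 : Int)
          = ([] : List Int).foldl (fun n c => PySem.Int.bor (n <<< 7) (PySem.Int.band c 127)) 0 := rfl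
      rw [h0, ih]
      simp [pvSplitG, h, pvDecodeB]

theorem pvLoopA_split0 (t : List Int) (nums : List Int) :
    (parseOidLoopA t (0, nums)).2 = nums ++ (pvSplitG t []).map pvDecodeB := by
  simpa using pvLoopA_split t [] nums

theorem parse_oid_eq_alt (oid_data : List Int) : parse_oid oid_data = parse_oid_alt oid_data := by
  simp only [parse_oid, parse_oid_alt]
  split_ifs
  · rfl
  · rfl
  · rfl
  · rfl
  · rw [pvLoopA_split0, pvFoldB_split, List.nil_append]

-- ===== VERDICT (by name: the statement is the Claim_ definition above) =====
theorem parse_oid_spec : Claim_equal_parse_oid := by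
  intro oid_data _
  unfold Spec_parse_oid
  exact parse_oid_eq_alt oid_data
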